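-- pv_equiv track=rewrite | github.com/matt-lab/advent-of-code_python | 2023/02/solution.py | is_valid_game
-- ===== SOURCE A (Python) =====
-- def is_valid_game(subsets, max_cubes = {"red": 12, "green": 13, "blue": 14}):
--     """Check if game is valid."""
--     could_be_valid = True
--     for subset in subsets:
--         for cube in subset:
--             for colour in cube:
--                 if cube[colour] > max_cubes[colour]:
--                     could_be_valid = False
--                     break
--     return could_be_valid
-- ===== SOURCE B (Python) =====
-- def is_valid_game(subsets, max_cubes = {"red": 12, "green": 13, "blue": 14}):
--     """Check if game is valid."""
--     needed = {}
--     for subset in subsets: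
--         for cube in subset:
--             for colour in cube:
--                 count = cube[colour]
--                 needed[colour] = max(needed.get(colour, count), count)
--     return all(count <= max_cubes[colour] for colour, count in needed.items())
-- ===== Notes on version B (the rewrite author's own statement) =====
-- stated objective: alternative
-- what changed: Replaces A's fused triple loop with break-flag by an aggregate-then-compare decomposition: first build a dict of the maximum count observed per colour, then check every aggregated maximum against max_cubes in a separate pass.
-- outside the precondition, e.g. on is_valid_game([[{'red': 100, 'x': 1}]], {'red': 12}): A returns False, B returns False
import Mathlib
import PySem

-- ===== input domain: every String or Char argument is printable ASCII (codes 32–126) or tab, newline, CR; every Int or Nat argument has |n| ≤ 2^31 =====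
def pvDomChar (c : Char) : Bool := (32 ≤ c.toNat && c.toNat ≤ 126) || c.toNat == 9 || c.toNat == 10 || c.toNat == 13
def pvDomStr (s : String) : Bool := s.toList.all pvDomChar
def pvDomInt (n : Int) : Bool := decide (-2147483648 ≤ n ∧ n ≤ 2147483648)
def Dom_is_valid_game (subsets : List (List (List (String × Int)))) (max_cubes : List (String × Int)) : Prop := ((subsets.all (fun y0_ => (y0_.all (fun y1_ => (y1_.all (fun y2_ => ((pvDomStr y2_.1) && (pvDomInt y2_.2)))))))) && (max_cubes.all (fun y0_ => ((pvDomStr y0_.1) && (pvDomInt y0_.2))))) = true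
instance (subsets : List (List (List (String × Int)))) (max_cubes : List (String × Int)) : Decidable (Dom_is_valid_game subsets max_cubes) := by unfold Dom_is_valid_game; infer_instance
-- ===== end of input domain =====

-- B replaces A's fused triple scan with an aggregate-then-compare shape: it first builds a
-- dict of the maximum count observed per colour, then compares those maxima to the limits
-- (objective: alternative decomposition; no speed claim).

-- ===== PORT A =====
-- Python dict lookup d[k] on an association list: first match; default 0 only reached outside Pre_.
def pvLook (d : List (String × Int)) (k : String) : Int := (List.lookup k d).getD 0

-- 'for colour in cube: if cube[colour] > max_cubes[colour]: could_be_valid = False; break'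
def pvColourLoopA (cube max_cubes : List (String × Int)) : List (String × Int) → Bool → Bool
  | [], cv => cv
  | e :: rest, cv =>
    if pvLook cube e.1 > pvLook max_cubes e.1 then false
    else pvColourLoopA cube max_cubes rest cv

def is_valid_game (subsets : List (List (List (String × Int)))) (max_cubes : List (String × Int)) : Bool :=
  subsets.foldl (fun cv subset =>
    subset.foldl (fun cv cube =>
      pvColourLoopA cube max_cubes cube cv) cv) true

-- ===== PORT B =====
def is_valid_game_alt (subsets : List (List (List (String × Int)))) (max_cubes : List (String × Int)) : Bool :=
  let needed : PySem.Dict String Int :=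
    subsets.foldl (fun d subset =>
      subset.foldl (fun d cube =>
        cube.foldl (fun d e =>
          let count := pvLook cube e.1
          d.insert e.1 (max (d.getD e.1 count) count)) d) d) PySem.Dict.empty
  needed.items.all (fun e => decide (e.2 ≤ pvLook max_cubes e.1))

-- ===== PRECONDITION & SPEC =====
-- Pre_ excludes inputs where some colour of some cube is missing from max_cubes: on those
-- Python A normally raises KeyError, and in the remaining corner (a break caused by an
-- earlier over-limit colour skips the missing key) whether either program raises or returns
-- False is an accident of scan order and short-circuiting, so the whole class is excluded.
def Pre_is_valid_game (subsets : List (List (List (String × Int)))) (max_cubes : List (String × Int)) : Prop :=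
  ∀ subset ∈ subsets, ∀ cube ∈ subset, ∀ e ∈ cube, (List.lookup e.1 max_cubes).isSome = true
instance (subsets : List (List (List (String × Int)))) (max_cubes : List (String × Int)) : Decidable (Pre_is_valid_game subsets max_cubes) := by unfold Pre_is_valid_game; infer_instance
def pvWitness_is_valid_game : (List (List (List (String × Int)))) × (List (String × Int)) :=
  ([[[("red", 3), ("blue", 2)], [("red", 5)]], [[("blue", 1)]]], [("red", 12), ("blue", 14)])

def Spec_is_valid_game (subsets : List (List (List (String × Int)))) (max_cubes : List (String × Int)) (out : Bool) : Prop := out = is_valid_game_alt subsets max_cubes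
instance (subsets : List (List (List (String × Int)))) (max_cubes : List (String × Int)) (out : Bool) : Decidable (Spec_is_valid_game subsets max_cubes out) := by unfold Spec_is_valid_game; infer_instance

-- ===== CLAIM (what is proved, stated in full; the proofs are below) =====
def Claim_equal_is_valid_game : Prop := ∀ (subsets : List (List (List (String × Int)))) (max_cubes : List (String × Int)), Dom_is_valid_game subsets max_cubes → Pre_is_valid_game subsets max_cubes → Spec_is_valid_game subsets max_cubes (is_valid_game subsets max_cubes)

-- ===== LEMMAS AND PROOFS =====

-- the common normal form: "every observed count is within its colour's limit"
def pvOccAll (subsets : List (List (List (String × Int)))) (max_cubes : List (String × Int)) : Bool :=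
  subsets.all (fun subset => subset.all (fun cube =>
    cube.all (fun e => decide (pvLook cube e.1 ≤ pvLook max_cubes e.1))))

theorem pv_colourLoopA_eq (cube mc : List (String × Int)) :
    ∀ (l : List (String × Int)) (cv : Bool),
      pvColourLoopA cube mc l cv = (cv && l.all (fun e => decide (pvLook cube e.1 ≤ pvLook mc e.1))) := by
  intro l
  induction l with
  | nil => intro cv; simp [pvColourLoopA]
  | cons e rest ih =>
    intro cv
    by_cases h : pvLook cube e.1 > pvLook mc e.1
    · have hd : decide (pvLook cube e.1 ≤ pvLook mc e.1) = false := by simp; omega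
      simp [pvColourLoopA, h, hd]
    · have hd : decide (pvLook cube e.1 ≤ pvLook mc e.1) = true := by simp; omega
      simp [pvColourLoopA, h, hd, ih]

theorem pv_foldl_and {α : Type} (step : Bool → α → Bool) (f : α → Bool)
    (h : ∀ cv x, step cv x = (cv && f x)) :
    ∀ (l : List α) (cv : Bool), l.foldl step cv = (cv && l.all f) := by
  intro l
  induction l with
  | nil => intro cv; simp
  | cons x xs ih => intro cv; simp [List.foldl, h, ih, Bool.and_assoc]

theorem pv_A_eq_occAll (subsets : List (List (List (String × Int)))) (mc : List (String × Int)) :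
    is_valid_game subsets mc = pvOccAll subsets mc := by
  unfold is_valid_game pvOccAll
  have hin : ∀ (cv : Bool) (subset : List (List (String × Int))),
      subset.foldl (fun cv cube => pvColourLoopA cube mc cube cv) cv
        = (cv && subset.all (fun cube => cube.all (fun e => decide (pvLook cube e.1 ≤ pvLook mc e.1)))) :=
    fun cv subset => pv_foldl_and _ _ (fun cv cube => pv_colourLoopA_eq cube mc cube cv) subset cv
  rw [pv_foldl_and _ _ hin subsets true, Bool.true_and]

-- B side: all items of the aggregated dict are within the limits
def pvPB (mc : List (String × Int)) (e : String × Int) : Bool := decide (e.2 ≤ pvLook mc e.1)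
def pvDAll (mc : List (String × Int)) (d : PySem.Dict String Int) : Bool := d.items.all (pvPB mc)

theorem pv_all_congr {α : Type} (l : List α) (f g : α → Bool) (h : ∀ x ∈ l, f x = g x) :
    l.all f = l.all g := by
  induction l with
  | nil => simp
  | cons x xs ih =>
    simp only [List.all_cons]
    rw [h x (by simp), ih (fun y hy => h y (by simp [hy]))]

theorem pv_all_update (ks : List String) (c : String) (f f' : String → Bool) (b : Bool)
    (hnd : ks.Nodup) (hmem : c ∈ ks)
    (hne : ∀ k ∈ ks, k ≠ c → f' k = f k) (hc : f' c = (f c && b)) :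
    ks.all f' = (ks.all f && b) := by
  induction ks with
  | nil => simp at hmem
  | cons k ks ih =>
    rcases List.nodup_cons.mp hnd with ⟨hk, hnd'⟩
    simp only [List.all_cons]
    rcases List.mem_cons.mp hmem with rfl | hmemc
    · have hrest : ks.all f' = ks.all f := by
        apply pv_all_congr
        intro x hx
        exact hne x (by simp [hx]) (by rintro rfl; exact hk hx)
      rw [hc, hrest]
      cases f c <;> cases b <;> simp
    · have hkc : k ≠ c := by rintro rfl; exact hk hmemc
      rw [hne k (by simp) hkc,
        ih hnd' hmemc (fun x hx hxc => hne x (by simp [hx]) hxc), Bool.and_assoc]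

theorem pv_dall_keys (mc : List (String × Int)) (d : PySem.Dict String Int) (hnd : d.keys.Nodup) :
    pvDAll mc d = d.keys.all (fun k => decide (d.getD k 0 ≤ pvLook mc k)) := by
  unfold pvDAll
  rw [PySem.Dict.items_eq_map_keys d hnd 0, List.all_map]
  rfl

theorem pv_step (mc : List (String × Int)) (d : PySem.Dict String Int) (c : String) (w : Int)
    (hnd : d.keys.Nodup) :
    pvDAll mc (d.insert c (max (d.getD c w) w)) = (pvDAll mc d && decide (w ≤ pvLook mc c)) := by
  by_cases hc : d.contains c = true
  · obtain ⟨u, hu⟩ := Option.isSome_iff_exists.mp (by rw [← PySem.Dict.contains_eq_isSome_get? d c]; exact hc)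
    have h1 : d.getD c w = u := PySem.Dict.getD_of_get?_eq_some d w hu
    have h2 : d.getD c 0 = u := PySem.Dict.getD_of_get?_eq_some d 0 hu
    have hnd2 : (d.insert c (max (d.getD c w) w)).keys.Nodup := PySem.Dict.nodup_keys_insert _ _ _ hnd
    rw [pv_dall_keys mc _ hnd2, pv_dall_keys mc d hnd,
      PySem.Dict.keys_insert_of_contains d (max (d.getD c w) w) hc]
    apply pv_all_update _ c _ _ _ hnd ((PySem.Dict.contains_iff_mem_keys d c).mp hc)
    · intro k _ hk
      rw [PySem.Dict.getD_insert_of_ne d _ _ hk]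
    · rw [PySem.Dict.getD_insert_self, h1, h2]
      simp
  · have hc' : d.contains c = false := by simpa using hc
    have h1 : d.getD c w = w := PySem.Dict.getD_of_not_contains d w hc'
    have hcm : c ∉ d.keys := fun h => hc ((PySem.Dict.contains_iff_mem_keys d c).mpr h)
    have hnd2 : (d.insert c (max (d.getD c w) w)).keys.Nodup := PySem.Dict.nodup_keys_insert _ _ _ hnd
    rw [pv_dall_keys mc _ hnd2, pv_dall_keys mc d hnd,
      PySem.Dict.keys_insert_of_not_contains d (max (d.getD c w) w) hc', List.all_append]
    have hrest :
        d.keys.all (fun k => decide ((d.insert c (max (d.getD c w) w)).getD k 0 ≤ pvLook mc k))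
          = d.keys.all (fun k => decide (d.getD k 0 ≤ pvLook mc k)) := by
      apply pv_all_congr
      intro k hk
      rw [PySem.Dict.getD_insert_of_ne d _ _ (by rintro rfl; exact hcm hk)]
    rw [hrest]
    simp [PySem.Dict.getD_insert_self, h1]

theorem pv_foldIns (mc : List (String × Int)) (v : String × Int → Int) :
    ∀ (l : List (String × Int)) (d : PySem.Dict String Int), d.keys.Nodup →
      pvDAll mc (l.foldl (fun d e => d.insert e.1 (max (d.getD e.1 (v e)) (v e))) d)
        = (pvDAll mc d && l.all (fun e => decide (v e ≤ pvLook mc e.1))) := by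
  intro l
  induction l with
  | nil => intro d _; simp
  | cons e rest ih =>
    intro d hnd
    have hnd2 : (d.insert e.1 (max (d.getD e.1 (v e)) (v e))).keys.Nodup :=
      PySem.Dict.nodup_keys_insert _ _ _ hnd
    simp only [List.foldl_cons, List.all_cons]
    rw [ih _ hnd2, pv_step mc d e.1 (v e) hnd, Bool.and_assoc]

theorem pv_nodup_cubeFold (cube : List (String × Int)) (d : PySem.Dict String Int)
    (hnd : d.keys.Nodup) :
    (cube.foldl (fun d e => d.insert e.1 (max (d.getD e.1 (pvLook cube e.1)) (pvLook cube e.1))) d).keys.Nodup :=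
  PySem.Dict.nodup_keys_foldl_insert_key cube Prod.fst
    (fun d e => max (d.getD e.1 (pvLook cube e.1)) (pvLook cube e.1)) d hnd

theorem pv_foldCubes (mc : List (String × Int)) :
    ∀ (subset : List (List (String × Int))) (d : PySem.Dict String Int), d.keys.Nodup →
      pvDAll mc (subset.foldl (fun d cube =>
          cube.foldl (fun d e => d.insert e.1 (max (d.getD e.1 (pvLook cube e.1)) (pvLook cube e.1))) d) d)
        = (pvDAll mc d && subset.all (fun cube =>
            cube.all (fun e => decide (pvLook cube e.1 ≤ pvLook mc e.1)))) := by
  intro subset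
  induction subset with
  | nil => intro d _; simp
  | cons cube rest ih =>
    intro d hnd
    simp only [List.foldl_cons, List.all_cons]
    rw [ih _ (pv_nodup_cubeFold cube d hnd),
      pv_foldIns mc (fun e => pvLook cube e.1) cube d hnd, Bool.and_assoc]

theorem pv_nodup_subsetFold (subset : List (List (String × Int))) (d : PySem.Dict String Int)
    (hnd : d.keys.Nodup) :
    (subset.foldl (fun d cube =>
        cube.foldl (fun d e => d.insert e.1 (max (d.getD e.1 (pvLook cube e.1)) (pvLook cube e.1))) d) d).keys.Nodup := by
  induction subset generalizing d with
  | nil => exact hnd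
  | cons cube rest ih => exact ih _ (pv_nodup_cubeFold cube d hnd)

theorem pv_foldSubsets (mc : List (String × Int)) :
    ∀ (subsets : List (List (List (String × Int)))) (d : PySem.Dict String Int), d.keys.Nodup →
      pvDAll mc (subsets.foldl (fun d subset => subset.foldl (fun d cube =>
          cube.foldl (fun d e => d.insert e.1 (max (d.getD e.1 (pvLook cube e.1)) (pvLook cube e.1))) d) d) d)
        = (pvDAll mc d && subsets.all (fun subset => subset.all (fun cube =>
            cube.all (fun e => decide (pvLook cube e.1 ≤ pvLook mc e.1))))) := by
  intro subsets
  induction subsets with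
  | nil => intro d _; simp
  | cons subset rest ih =>
    intro d hnd
    simp only [List.foldl_cons, List.all_cons]
    rw [ih _ (pv_nodup_subsetFold subset d hnd), pv_foldCubes mc subset d hnd, Bool.and_assoc]

theorem pv_B_eq_occAll (subsets : List (List (List (String × Int)))) (mc : List (String × Int)) :
    is_valid_game_alt subsets mc = pvOccAll subsets mc := by
  show pvDAll mc (subsets.foldl (fun d subset => subset.foldl (fun d cube =>
      cube.foldl (fun d e => d.insert e.1 (max (d.getD e.1 (pvLook cube e.1)) (pvLook cube e.1))) d) d) PySem.Dict.empty)
    = pvOccAll subsets mc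
  rw [pv_foldSubsets mc subsets PySem.Dict.empty PySem.Dict.nodup_keys_empty]
  have h0 : pvDAll mc PySem.Dict.empty = true := rfl
  rw [h0, Bool.true_and]
  rfl

-- ===== VERDICT (by name: the statement is the Claim_ definition above) =====
theorem is_valid_game_spec : Claim_equal_is_valid_game := by
  intro subsets mc _ _
  unfold Spec_is_valid_game
  rw [pv_A_eq_occAll, pv_B_eq_occAll]
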